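-- pv_equiv track=rewrite | github.com/RoAnWo/Visualisation | text2 copy 7.py | generateLinesNum
-- ===== SOURCE A (Python) =====
-- def generateLinesNum(listpoints):
--         listLines = []
--
--         for i in range(len(listpoints)):
--             if i < len(listpoints)-1:
--                 CurrentLine = [listpoints[i], listpoints[i+1]]
--                 listLines.append(CurrentLine)
--
--             else:
--                 CurrentLine = [listpoints[i], listpoints[i-(len(listpoints)-1)]]
--                 listLines.append(CurrentLine)
--         return listLines
-- ===== SOURCE B (Python) =====
-- def generateLinesNum(listpoints):
--     if not listpoints:
--         return []
--
--     def open_segments(seg):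
--         # segments between consecutive points of seg (no wrap), by divide and conquer
--         if len(seg) < 2:
--             return []
--         mid = len(seg) // 2
--         left, right = seg[:mid], seg[mid:]
--         return open_segments(left) + [[left[-1], right[0]]] + open_segments(right)
--
--     return open_segments(listpoints) + [[listpoints[-1], listpoints[0]]]
-- ===== Notes on version B (the rewrite author's own statement) =====
-- stated objective: alternative
-- what changed: Replaces A's linear index loop with its last-vs-rest boundary branch by a divide-and-conquer construction: the open chain of consecutive segments of each half is built recursively and joined with the bridging segment, and the single wrap-around segment is appended at the end.
import Mathlib
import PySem

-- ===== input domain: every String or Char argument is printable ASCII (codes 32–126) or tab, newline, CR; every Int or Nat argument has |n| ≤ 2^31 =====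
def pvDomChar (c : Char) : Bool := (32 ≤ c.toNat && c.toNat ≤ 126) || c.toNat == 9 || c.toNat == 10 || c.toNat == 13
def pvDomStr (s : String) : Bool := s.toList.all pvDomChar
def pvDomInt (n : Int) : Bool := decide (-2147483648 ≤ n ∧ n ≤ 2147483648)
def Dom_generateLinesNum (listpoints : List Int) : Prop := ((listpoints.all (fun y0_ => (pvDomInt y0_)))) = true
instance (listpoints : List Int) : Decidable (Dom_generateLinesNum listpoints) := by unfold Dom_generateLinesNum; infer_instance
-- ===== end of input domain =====

-- B replaces A's linear index loop (with its last-vs-rest boundary branch) by divide and conquer: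
-- the open chain of consecutive segments of each half is built recursively and joined with the
-- bridging segment, then the wrap-around segment is appended once at the end.

-- ===== PORT A =====
-- literal port of A: loop i in range(len), branch on i < len-1, append a two-element line each step
def generateLinesNum (listpoints : List Int) : List (List Int) :=
  (PySem.List.pyRange 0 (listpoints.length : Int) 1).foldl
    (fun listLines i =>
      if i < (listpoints.length : Int) - 1 then
        listLines ++ [[PySem.List.pyGetD listpoints i 0, PySem.List.pyGetD listpoints (i + 1) 0]]
      else
        listLines ++ [[PySem.List.pyGetD listpoints i 0,
                       PySem.List.pyGetD listpoints (i - ((listpoints.length : Int) - 1)) 0]])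
    []

-- ===== PORT B =====
-- mid = len(seg) // 2 on a Nat length equals the cast of Nat division (cited by the port's decreasing_by)
theorem pv_mid_eq (n : Nat) : PySem.Int.floordiv (n : Int) 2 = ((n / 2 : Nat) : Int) := by
  exact_mod_cast PySem.Int.floordiv_natCast n 2

-- port of B's helper open_segments: divide and conquer on the segment
def chainOpen (seg : List Int) : List (List Int) :=
  if h : seg.length < 2 then []
  else
    let mid := PySem.Int.floordiv (seg.length : Int) 2
    let left := PySem.List.slice seg none (some mid)
    let right := PySem.List.slice seg (some mid) none
    chainOpen left ++ [[PySem.List.pyGetD left (-1) 0, PySem.List.pyGetD right 0 0]]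
      ++ chainOpen right
termination_by seg.length
decreasing_by
  · simp only [pv_mid_eq, PySem.List.slice_to_natCast, List.length_take]
    omega
  · simp only [pv_mid_eq, PySem.List.slice_from_natCast, List.length_drop]
    omega

def generateLinesNum_alt (listpoints : List Int) : List (List Int) :=
  match listpoints with
  | [] => []
  | _ :: _ =>
    chainOpen listpoints
      ++ [[PySem.List.pyGetD listpoints (-1) 0, PySem.List.pyGetD listpoints 0 0]]

-- ===== PRECONDITION & SPEC =====
def Spec_generateLinesNum (listpoints : List Int) (out : List (List Int)) : Prop := out = generateLinesNum_alt listpoints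
instance (listpoints : List Int) (out : List (List Int)) : Decidable (Spec_generateLinesNum listpoints out) := by unfold Spec_generateLinesNum; infer_instance

-- ===== CLAIM (what is proved, stated in full; the proofs are below) =====
def Claim_equal_generateLinesNum : Prop := ∀ (listpoints : List Int), Dom_generateLinesNum listpoints → Spec_generateLinesNum listpoints (generateLinesNum listpoints)

-- ===== LEMMAS AND PROOFS =====

-- the intended result: the segment between each point and its successor
def pvAdj (l : List Int) : List (List Int) := (l.zip l.tail).map (fun ab => [ab.1, ab.2])
def pvLast (l : List Int) : Int := l.getLast?.getD 0
def pvHead (l : List Int) : Int := l.head?.getD 0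

theorem pvAdj_cons_cons (x y : Int) (l : List Int) :
    pvAdj (x :: y :: l) = [x, y] :: pvAdj (y :: l) := rfl

theorem pv_pyGetD_last (l : List Int) (h : l ≠ []) :
    PySem.List.pyGetD l (-1) 0 = pvLast l := by
  rw [PySem.List.pyGetD_neg_one l 0 h]
  simp only [pvLast, List.getLast?_eq_some_getLast h, Option.getD_some]

theorem pv_pyGetD_head (l : List Int) (h : l ≠ []) :
    PySem.List.pyGetD l 0 0 = pvHead l := by
  cases l with
  | nil => exact absurd rfl h
  | cons x xs => simp [PySem.List.pyGetD_zero_cons, pvHead]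

theorem pvAdj_append : ∀ (a b : List Int), a ≠ [] → b ≠ [] →
    pvAdj (a ++ b) = pvAdj a ++ [[pvLast a, pvHead b]] ++ pvAdj b := by
  intro a
  induction a with
  | nil => intro b ha _; exact absurd rfl ha
  | cons x a' ih =>
    intro b _ hb
    cases a' with
    | nil =>
      cases b with
      | nil => exact absurd rfl hb
      | cons y ys => simp [pvAdj, pvLast, pvHead]
    | cons x2 a'' =>
      have h := ih b (by simp) hb
      simp only [List.cons_append, pvAdj_cons_cons]
      rw [show (x2 :: a'') ++ b = x2 :: (a'' ++ b) from rfl] at h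
      rw [h]
      simp [pvLast, List.getLast?_cons_cons]

-- zipping a list with its rotation = the open chain plus the wrap segment
theorem pv_zip_rot : ∀ (l : List Int), l ≠ [] → ∀ a : Int,
    ((l.zip (l.tail ++ [a])).map (fun ab => [ab.1, ab.2])) = pvAdj l ++ [[pvLast l, a]] := by
  intro l
  induction l with
  | nil => intro h; exact absurd rfl h
  | cons x xs ih =>
    intro _ a
    cases xs with
    | nil => simp [pvAdj, pvLast]
    | cons y ys =>
      have h := ih (by simp) a
      simp only [List.tail_cons] at h ⊢
      rw [show (y :: ys) ++ [a] = y :: (ys ++ [a]) from rfl, List.zip_cons_cons, List.map_cons,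
          h, pvAdj_cons_cons]
      simp [pvLast, List.getLast?_cons_cons]

-- chainOpen computes the open chain of consecutive segments
theorem pv_chainOpen_eq : ∀ (n : Nat) (l : List Int), l.length ≤ n → chainOpen l = pvAdj l := by
  intro n
  induction n with
  | zero =>
    intro l hl
    have : l = [] := List.eq_nil_of_length_eq_zero (Nat.le_zero.mp hl)
    subst this
    rw [chainOpen]
    rfl
  | succ n ih =>
    intro l hl
    rw [chainOpen]
    by_cases h : l.length < 2
    · rw [dif_pos h]
      match l, h with
      | [], _ => rfl
      | [x], _ => rfl
    · rw [dif_neg h]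
      simp only [pv_mid_eq, PySem.List.slice_to_natCast, PySem.List.slice_from_natCast]
      have hlen : 2 ≤ l.length := by omega
      have hmid1 : 1 ≤ l.length / 2 := by omega
      have hmidlt : l.length / 2 < l.length := by omega
      have hlt : (l.take (l.length / 2)) ≠ [] := by
        simp [List.take_eq_nil_iff]
        constructor
        · omega
        · intro he; subst he; simp at hlen
      have hrt : (l.drop (l.length / 2)) ≠ [] := by
        simp [List.drop_eq_nil_iff]; exact hmidlt
      have htl : (l.take (l.length / 2)).length ≤ n := by
        rw [List.length_take, Nat.min_eq_left (le_of_lt hmidlt)]; omega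
      have hdl : (l.drop (l.length / 2)).length ≤ n := by
        rw [List.length_drop]; omega
      rw [ih (l.take (l.length / 2)) htl, ih (l.drop (l.length / 2)) hdl,
          pv_pyGetD_last _ hlt, pv_pyGetD_head _ hrt]
      have := pvAdj_append (l.take (l.length / 2)) (l.drop (l.length / 2)) hlt hrt
      rw [List.take_append_drop] at this
      rw [this]

-- A's loop appends one element per iteration whichever branch fires: turn it into a map
theorem pv_foldl_ite_append {α β : Type} (l : List α) (p : α → Bool) (f g : α → β) (acc : List β) :
    l.foldl (fun a x => if p x then a ++ [f x] else a ++ [g x]) acc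
      = acc ++ l.map (fun x => if p x then f x else g x) := by
  induction l generalizing acc with
  | nil => simp
  | cons y ys ih => by_cases h : p y <;> simp [h, ih]

theorem pv_A_eq_map (l : List Int) :
    generateLinesNum l
      = (List.range l.length).map (fun (k : Nat) =>
          if (k : Int) < (l.length : Int) - 1 then
            [PySem.List.pyGetD l (k : Int) 0, PySem.List.pyGetD l ((k : Int) + 1) 0]
          else
            [PySem.List.pyGetD l (k : Int) 0,
             PySem.List.pyGetD l ((k : Int) - ((l.length : Int) - 1)) 0]) := by
  unfold generateLinesNum
  have h := pv_foldl_ite_append (PySem.List.pyRange 0 (l.length : Int) 1)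
      (fun i => decide (i < (l.length : Int) - 1))
      (fun i => [PySem.List.pyGetD l i 0, PySem.List.pyGetD l (i + 1) 0])
      (fun i => [PySem.List.pyGetD l i 0, PySem.List.pyGetD l (i - ((l.length : Int) - 1)) 0])
      []
  simp only [decide_eq_true_eq] at h
  rw [h]
  rw [PySem.List.pyRange_one, List.map_map]
  simp only [Int.sub_zero, Int.toNat_natCast, List.nil_append]
  apply List.map_congr_left
  intro k _
  simp

-- A equals the zip-with-rotation form
theorem pv_A_zip (x : Int) (xs : List Int) :
    generateLinesNum (x :: xs)
      = (((x :: xs).zip (xs ++ [x])).map (fun ab => [ab.1, ab.2])) := by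
  rw [pv_A_eq_map]
  apply List.ext_getElem
  · simp [List.length_zip]
  · intro k hk hk'
    have hklen : k < xs.length + 1 := by simpa using hk
    simp only [List.getElem_map, List.getElem_range, List.getElem_zip]
    have ecast : ((k : Int) + 1) = ((k + 1 : Nat) : Int) := by push_cast; ring
    by_cases h : (k : Int) < ((x :: xs).length : Int) - 1
    · have hkx : k < xs.length := by simp at h; omega
      rw [if_pos h, ecast]
      simp only [PySem.List.pyGetD_natCast]
      rw [List.getD_eq_getElem _ _ (by simpa using hklen),
          List.getD_eq_getElem _ _ (by simp; omega)]
      have hx : (xs ++ [x])[k]'(by simp; omega) = xs[k] := List.getElem_append_left hkx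
      rw [hx]
      simp
    · have hk1 : k = xs.length := by simp at h; omega
      rw [if_neg h]
      have hz : (k : Int) - (((x :: xs).length : Int) - 1) = ((0 : Nat) : Int) := by
        simp [hk1]
      rw [hz]
      simp only [PySem.List.pyGetD_natCast]
      rw [List.getD_eq_getElem _ _ (by simpa using hklen),
          List.getD_eq_getElem _ _ (by simp)]
      have hx : (xs ++ [x])[k]'(by simp; omega) = x := by
        rw [List.getElem_append_right (by omega)]
        simp [hk1]
      rw [hx]
      simp

theorem generateLinesNum_spec' (l : List Int) :
    generateLinesNum l = generateLinesNum_alt l := by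
  cases l with
  | nil => rfl
  | cons x xs =>
    have hne : (x :: xs) ≠ [] := by simp
    rw [pv_A_zip,
        show generateLinesNum_alt (x :: xs)
            = chainOpen (x :: xs)
              ++ [[PySem.List.pyGetD (x :: xs) (-1) 0, PySem.List.pyGetD (x :: xs) 0 0]] from rfl,
        pv_chainOpen_eq (x :: xs).length _ le_rfl, pv_pyGetD_last _ hne, pv_pyGetD_head _ hne]
    have h := pv_zip_rot (x :: xs) hne x
    simp only [List.tail_cons] at h
    rw [h]
    simp [pvHead]

-- ===== VERDICT (by name: the statement is the Claim_ definition above) =====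
theorem generateLinesNum_spec : Claim_equal_generateLinesNum := by
  intro l _
  unfold Spec_generateLinesNum
  exact generateLinesNum_spec' l
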